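-- pv_equiv track=rewrite | github.com/MarkGfrv/GIIS | Lab5/lab5(project)/lab5(scripts)/polygonsConstruct.py | check_polygon
-- ===== SOURCE A (Python) =====
-- def check_polygon(polygon: list):
--     polygon.append(polygon[0])
--     vectors, results = [], []
--     for i in range(len(polygon) - 1):
--         vector = [polygon[i+1][0]-polygon[i][0], polygon[i+1][1]-polygon[i][1]]
--         vectors.append(vector)
--     vectors.append(vectors[0])
--     for i in range(len(vectors) - 1):
--         results.append(vectors[i][0] * vectors[i+1][1] - vectors[i][1] * vectors[i+1][0])
--     positives = sum(1 for x in results if x > 0)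
--     negatives = sum(1 for x in results if x < 0)
--     if positives and negatives:
--         return "Полингон вогнутый."
--     elif positives and not negatives:
--         return "Полигон выпуклый. Внутренние нормали ориентированы влево от его контура."
--     elif negatives and not positives:
--         return "Полигон выпуклый. Внутренние нормали ориентированы вправо от его контура."
--     elif not positives and not negatives:
--         return "Полигон вырождается в отрезок."
-- ===== SOURCE B (Python) =====
-- def _cross(p0, p1, p2):
--     return (p1[0] - p0[0]) * (p2[1] - p1[1]) - (p1[1] - p0[1]) * (p2[0] - p1[0])
--
--
-- def check_polygon(polygon: list):
--     n = len(polygon)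
--     polygon.append(polygon[0])  # same observable mutation as the original
--     positives = negatives = 0
--     for i in range(n):
--         cross = _cross(polygon[i], polygon[(i + 1) % n], polygon[(i + 2) % n])
--         if cross > 0:
--             positives += 1
--         elif cross < 0:
--             negatives += 1
--     if positives and negatives:
--         return "Полингон вогнутый."
--     elif positives and not negatives:
--         return "Полигон выпуклый. Внутренние нормали ориентированы влево от его контура."
--     elif negatives and not positives:
--         return "Полигон выпуклый. Внутренние нормали ориентированы вправо от его контура."
--     elif not positives and not negatives:
--         return "Полигон вырождается в отрезок."
-- ===== Notes on version B (the rewrite author's own statement) =====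
-- stated objective: simpler
-- what changed: One single pass over the vertices computing each cross product directly from three cyclically-indexed consecutive points with two running counters, instead of materialising the intermediate `vectors` and `results` lists in three separate passes.
import Mathlib
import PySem

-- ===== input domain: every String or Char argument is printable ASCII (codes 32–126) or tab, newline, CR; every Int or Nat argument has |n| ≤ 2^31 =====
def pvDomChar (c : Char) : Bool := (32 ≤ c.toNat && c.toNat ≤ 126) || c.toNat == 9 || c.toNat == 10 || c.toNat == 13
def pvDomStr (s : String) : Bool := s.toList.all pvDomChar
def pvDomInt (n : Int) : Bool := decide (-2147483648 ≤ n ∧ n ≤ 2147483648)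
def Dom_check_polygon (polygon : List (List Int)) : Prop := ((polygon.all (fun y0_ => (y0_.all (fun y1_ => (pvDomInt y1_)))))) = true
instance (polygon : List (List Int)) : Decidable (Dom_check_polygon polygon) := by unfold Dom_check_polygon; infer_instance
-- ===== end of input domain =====

-- B replaces A's three passes (edge-vector list, appended copy, cross-product list) by one single
-- pass over the vertices with cyclic indexing and two running counters (objective: simpler).
-- Note: the Python A (and B) append polygon[0] to the argument in place; the equivalence proved
-- here is about the RETURN value only (B performs the same mutation).


-- ===== PORT A =====
-- Literal transliteration of A.  Under Pre_ every index is in range, so `List.getD` is exact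
-- (Python raises IndexError exactly on the inputs Pre_ excludes).
def check_polygon (polygon : List (List Int)) : String :=
  -- polygon.append(polygon[0])
  let poly := polygon ++ [polygon.headD []]
  -- first loop: edge vectors
  let vectors := (List.range (poly.length - 1)).map (fun i =>
    [(poly.getD (i + 1) []).getD 0 0 - (poly.getD i []).getD 0 0,
     (poly.getD (i + 1) []).getD 1 0 - (poly.getD i []).getD 1 0])
  -- vectors.append(vectors[0])
  let vectors2 := vectors ++ [vectors.headD []]
  -- second loop: cross products of consecutive vectors
  let results := (List.range (vectors2.length - 1)).map (fun i =>
    (vectors2.getD i []).getD 0 0 * (vectors2.getD (i + 1) []).getD 1 0 -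
    (vectors2.getD i []).getD 1 0 * (vectors2.getD (i + 1) []).getD 0 0)
  let positives := results.countP (fun x => 0 < x)
  let negatives := results.countP (fun x => x < 0)
  if positives ≠ 0 ∧ negatives ≠ 0 then "Полингон вогнутый."
  else if positives ≠ 0 ∧ negatives = 0 then "Полигон выпуклый. Внутренние нормали ориентированы влево от его контура."
  else if negatives ≠ 0 ∧ positives = 0 then "Полигон выпуклый. Внутренние нормали ориентированы вправо от его контура."
  else "Полигон вырождается в отрезок."  -- final elif (not positives and not negatives): exhaustive here

-- ===== PORT B =====
-- Transliteration of Source B: helper _cross, then one counting loop over the original vertices.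
-- Source B's in-place append only adds a trailing element that the loop (indices < n, and
-- (i+k) % n < n) never reads, so the port reads `polygon` directly.
def pvCross (p0 p1 p2 : List Int) : Int :=
  (p1.getD 0 0 - p0.getD 0 0) * (p2.getD 1 0 - p1.getD 1 0) -
  (p1.getD 1 0 - p0.getD 1 0) * (p2.getD 0 0 - p1.getD 0 0)

def check_polygon_alt (polygon : List (List Int)) : String :=
  let n := polygon.length
  let pn := (List.range n).foldl (fun (pn : Nat × Nat) i =>
    let cross := pvCross (polygon.getD i []) (polygon.getD ((i + 1) % n) []) (polygon.getD ((i + 2) % n) [])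
    if 0 < cross then (pn.1 + 1, pn.2)
    else if cross < 0 then (pn.1, pn.2 + 1)
    else pn) (0, 0)
  let positives := pn.1
  let negatives := pn.2
  if positives ≠ 0 ∧ negatives ≠ 0 then "Полингон вогнутый."
  else if positives ≠ 0 ∧ negatives = 0 then "Полигон выпуклый. Внутренние нормали ориентированы влево от его контура."
  else if negatives ≠ 0 ∧ positives = 0 then "Полигон выпуклый. Внутренние нормали ориентированы вправо от его контура."
  else "Полигон вырождается в отрезок."

-- ===== PRECONDITION & SPEC =====
-- Pre_ excludes exactly the inputs on which the Python A raises IndexError: the empty list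
-- (polygon[0]) and polygons containing a point with fewer than two coordinates.
def Pre_check_polygon (polygon : List (List Int)) : Prop :=
  polygon ≠ [] ∧ ∀ p ∈ polygon, 2 ≤ p.length
instance (polygon : List (List Int)) : Decidable (Pre_check_polygon polygon) := by
  unfold Pre_check_polygon; infer_instance
def pvWitness_check_polygon : List (List Int) := [[0, 0], [1, 0], [0, 1]]

def Spec_check_polygon (polygon : List (List Int)) (out : String) : Prop := out = check_polygon_alt polygon
instance (polygon : List (List Int)) (out : String) : Decidable (Spec_check_polygon polygon out) := by unfold Spec_check_polygon; infer_instance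

-- ===== CLAIM (what is proved, stated in full; the proofs are below) =====
def Claim_equal_check_polygon : Prop := ∀ (polygon : List (List Int)), Dom_check_polygon polygon → Pre_check_polygon polygon → Spec_check_polygon polygon (check_polygon polygon)

-- ===== LEMMAS AND PROOFS =====

-- B's per-index cross product, and the common normal form both ports are reduced to
def pvCrossB (polygon : List (List Int)) (i : Nat) : Int :=
  pvCross (polygon.getD i []) (polygon.getD ((i + 1) % polygon.length) [])
    (polygon.getD ((i + 2) % polygon.length) [])

def pvCanon (polygon : List (List Int)) : String :=
  let positives := (List.range polygon.length).countP (fun i => 0 < pvCrossB polygon i)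
  let negatives := (List.range polygon.length).countP (fun i => pvCrossB polygon i < 0)
  if positives ≠ 0 ∧ negatives ≠ 0 then "Полингон вогнутый."
  else if positives ≠ 0 ∧ negatives = 0 then "Полигон выпуклый. Внутренние нормали ориентированы влево от его контура."
  else if negatives ≠ 0 ∧ positives = 0 then "Полигон выпуклый. Внутренние нормали ориентированы вправо от его контура."
  else "Полигон вырождается в отрезок."

-- the counting fold is a pair of countP's
lemma pv_foldl_count (f : Nat → Int) : ∀ (l : List Nat) (a b : Nat),
    l.foldl (fun (pn : Nat × Nat) i =>
      if 0 < f i then (pn.1 + 1, pn.2)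
      else if f i < 0 then (pn.1, pn.2 + 1)
      else pn) (a, b)
    = (a + l.countP (fun i => 0 < f i), b + l.countP (fun i => f i < 0)) := by
  intro l
  induction l with
  | nil => intro a b; simp
  | cons x l ih =>
    intro a b
    simp only [List.foldl_cons, List.countP_cons]
    by_cases h1 : 0 < f x
    · have h2 : ¬ f x < 0 := by omega
      simp only [ih, h1, h2, decide_true, decide_false, if_false, if_true]
      simp [Prod.ext_iff]; omega
    · by_cases h2 : f x < 0
      · simp only [ih, h1, h2, decide_true, decide_false, if_false, if_true]
        simp [Prod.ext_iff]; omega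
      · simp [ih, h1, h2]

lemma pv_alt_eq (polygon : List (List Int)) : check_polygon_alt polygon = pvCanon polygon := by
  simp only [check_polygon_alt, pvCanon]
  rw [pv_foldl_count (fun i => pvCross (polygon.getD i [])
        (polygon.getD ((i + 1) % polygon.length) []) (polygon.getD ((i + 2) % polygon.length) []))]
  simp [pvCrossB]

lemma pv_getD_map_range {α : Type} (f : Nat → α) (n i : Nat) (hi : i < n) (d : α) :
    ((List.range n).map f).getD i d = f i := by
  rw [List.getD_eq_getElem?_getD]
  simp [hi]

-- A's appended polygon, read cyclically
lemma pv_poly_getD (polygon : List (List Int)) (h : polygon ≠ []) (k : Nat)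
    (hk : k ≤ polygon.length) :
    (polygon ++ [polygon.headD []]).getD k [] = polygon.getD (k % polygon.length) [] := by
  rcases Nat.lt_or_ge k polygon.length with hlt | hge
  · rw [Nat.mod_eq_of_lt hlt, List.getD_eq_getElem?_getD, List.getD_eq_getElem?_getD,
      List.getElem?_append_left hlt]
  · have hk' : k = polygon.length := le_antisymm hk hge
    subst hk'
    rw [Nat.mod_self, List.getD_eq_getElem?_getD, List.getElem?_append_right (le_refl _)]
    cases polygon with
    | nil => exact absurd rfl h
    | cons p ps => simp

-- A's results list is exactly B's list of cyclic cross products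
lemma pv_results_eq (polygon : List (List Int)) (h : polygon ≠ []) :
    (let poly := polygon ++ [polygon.headD []]
     let vectors := (List.range (poly.length - 1)).map (fun i =>
       [(poly.getD (i + 1) []).getD 0 0 - (poly.getD i []).getD 0 0,
        (poly.getD (i + 1) []).getD 1 0 - (poly.getD i []).getD 1 0])
     let vectors2 := vectors ++ [vectors.headD []]
     (List.range (vectors2.length - 1)).map (fun i =>
       (vectors2.getD i []).getD 0 0 * (vectors2.getD (i + 1) []).getD 1 0 -
       (vectors2.getD i []).getD 1 0 * (vectors2.getD (i + 1) []).getD 0 0))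
    = (List.range polygon.length).map (pvCrossB polygon) := by
  have hn : 0 < polygon.length := List.length_pos_iff.mpr h
  set n := polygon.length with hn_def
  set v : Nat → List Int := fun i =>
    [((polygon ++ [polygon.headD []]).getD (i + 1) []).getD 0 0 -
       ((polygon ++ [polygon.headD []]).getD i []).getD 0 0,
     ((polygon ++ [polygon.headD []]).getD (i + 1) []).getD 1 0 -
       ((polygon ++ [polygon.headD []]).getD i []).getD 1 0] with hv
  simp only []
  have hlen1 : (polygon ++ [polygon.headD []]).length - 1 = n := by simp [hn_def]
  rw [hlen1]
  have hlen2 : (((List.range n).map v) ++ [((List.range n).map v).headD []]).length - 1 = n := by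
    simp
  rw [hlen2]
  -- headD of the vector list is v 0
  have hhead : ((List.range n).map v).headD [] = v 0 := by
    obtain ⟨m, hm⟩ : ∃ m, n = m + 1 := ⟨n - 1, by omega⟩
    rw [hm, List.range_succ_eq_map]
    simp
  -- getD on vectors2, cyclically
  have hvd : ∀ j : Nat, j ≤ n →
      (((List.range n).map v) ++ [((List.range n).map v).headD []]).getD j [] = v (j % n) := by
    intro j hj
    rcases Nat.lt_or_ge j n with hlt | hge
    · rw [Nat.mod_eq_of_lt hlt, List.getD_eq_getElem?_getD,
        List.getElem?_append_left (by simp [hlt])]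
      rw [← List.getD_eq_getElem?_getD, pv_getD_map_range _ _ _ hlt]
    · have hj' : j = n := le_antisymm hj hge
      subst hj'
      rw [List.getD_eq_getElem?_getD, List.getElem?_append_right (by simp)]
      simpa using hhead
  apply List.map_congr_left
  intro i hi
  have hi' : i < n := List.mem_range.mp hi
  rw [hvd i (le_of_lt hi'), hvd (i + 1) (by omega), Nat.mod_eq_of_lt hi']
  have hj2 : (i + 1) % n < n := Nat.mod_lt _ hn
  rw [hv]
  simp only [List.getD_cons_zero, List.getD_cons_succ]
  rw [pv_poly_getD polygon h i (le_of_lt hi'), pv_poly_getD polygon h (i + 1) (by omega),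
    pv_poly_getD polygon h ((i + 1) % n) (le_of_lt hj2),
    pv_poly_getD polygon h ((i + 1) % n + 1) (by omega),
    Nat.mod_eq_of_lt hi', Nat.mod_eq_of_lt hj2, Nat.mod_add_mod]
  unfold pvCrossB pvCross
  rw [← hn_def]

lemma pv_A_eq (polygon : List (List Int)) (h : polygon ≠ []) :
    check_polygon polygon = pvCanon polygon := by
  have hres := pv_results_eq polygon h
  simp only [] at hres
  simp only [check_polygon, pvCanon]
  rw [hres]
  simp [List.countP_map, Function.comp]

-- ===== VERDICT (by name: the statement is the Claim_ definition above) =====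
theorem check_polygon_spec : Claim_equal_check_polygon := by
  intro polygon _ hpre
  unfold Spec_check_polygon
  rw [pv_A_eq polygon hpre.1, pv_alt_eq]
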